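/- GENERATED by farm/mkstatement.py from design/units.tsv (unit `__asan_storeN_noabort`) and the Specs of Vorbis/Spec/*.lean — do not edit.
   THE STATEMENT of the proof unit `__asan_storeN_noabort`: the function `__asan_storeN_noabort` (19 instructions) satisfies its contract,
   given the contracts of its callees. What the names mean: Vorbis/Spec/Basic.lean. The theorem to prove:
   `theorem asan_storeN_noabort_ok : Vorbis.Spec.asan_storeN_noabort.Statement`. -/
import Vorbis.Spec.Runtime
namespace Vorbis.Spec.asan_storeN_noabort
open X86 X86.User Asan

/-- The statement of unit `__asan_storeN_noabort`. -/
def Statement : Prop :=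
  ∀ (Lay : Layout) (_hLay : Lay.hi = 0x1000000) (μ : Microarch) (_hμ : UserX.MicroOK μ) (u₀ : State)
    (_hcode : HasCodeNat Lay u₀ Vorbis.L.__asan_storeN_noabort.entry Vorbis.Code.code___asan_storeN_noabort.nat Vorbis.L.__asan_storeN_noabort.size)
    (_h_range_bad : Calls Lay μ Vorbis.WayInv (Vorbis.conv u₀) Vorbis.L.range_bad.entry Asan.rangeBadSpec),
    Calls Lay μ Vorbis.WayInv (Vorbis.conv u₀) Vorbis.L.__asan_storeN_noabort.entry Asan.checkNSpec

end Vorbis.Spec.asan_storeN_noabort
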